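-- pv_equiv track=rewrite | github.com/JaimeBallesterosCalvo/practica-2 | parte2/parte2.py | pacientesRecoger
-- ===== SOURCE A (Python) =====
-- def pacientesRecoger(datos):
--     #la función recorrera el mapa, guardando la dirección de donde están cada paciente y los hospitales
--     noContagiados= []
--     contagiados=[]
--     hospitalContagiado = []
--     hospitalNoContagiado = []
--     contadorFila=-1
--     for fila in datos:
--         contadorFila+=1
--         contadorColumna=-1
--         for estado in fila:
--             contadorColumna+=1
--             if estado =="N":
--                 noContagiados.append([contadorFila, contadorColumna])
--             elif estado =="C":
--                 contagiados.append([contadorFila, contadorColumna ])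
--             elif estado =="CC":
--                 hospitalContagiado.append([contadorFila, contadorColumna ])
--             elif estado =="CN":
--                 hospitalNoContagiado.append([contadorFila, contadorColumna ])
--     totalPacientes=noContagiados+contagiados
--     return totalPacientes, noContagiados, contagiados, hospitalContagiado, hospitalNoContagiado
-- ===== SOURCE B (Python) =====
-- def pacientesRecoger(datos):
--     noContagiados = [[i, j] for i, fila in enumerate(datos) for j, e in enumerate(fila) if e == "N"]
--     contagiados = [[i, j] for i, fila in enumerate(datos) for j, e in enumerate(fila) if e == "C"]
--     hospitalContagiado = [[i, j] for i, fila in enumerate(datos) for j, e in enumerate(fila) if e == "CC"]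
--     hospitalNoContagiado = [[i, j] for i, fila in enumerate(datos) for j, e in enumerate(fila) if e == "CN"]
--     totalPacientes = noContagiados + contagiados
--     return totalPacientes, noContagiados, contagiados, hospitalContagiado, hospitalNoContagiado
-- ===== Notes on version B (the rewrite author's own statement) =====
-- stated objective: idiomatic
-- what changed: Replaced the single mutating double loop with manual contadorFila/contadorColumna counters by four independent enumerate-based list comprehensions, one per state code, plus a concatenation for the total.
import Mathlib
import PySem

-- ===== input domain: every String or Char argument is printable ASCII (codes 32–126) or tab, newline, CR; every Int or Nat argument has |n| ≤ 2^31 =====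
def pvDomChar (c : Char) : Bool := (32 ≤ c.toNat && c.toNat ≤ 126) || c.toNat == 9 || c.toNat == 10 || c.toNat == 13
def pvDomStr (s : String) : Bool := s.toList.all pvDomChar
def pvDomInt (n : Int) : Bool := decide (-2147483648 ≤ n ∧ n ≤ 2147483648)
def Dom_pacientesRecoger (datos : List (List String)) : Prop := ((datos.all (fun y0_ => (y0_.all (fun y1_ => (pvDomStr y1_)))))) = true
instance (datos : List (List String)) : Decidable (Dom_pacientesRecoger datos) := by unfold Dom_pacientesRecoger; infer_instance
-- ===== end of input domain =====

-- B replaces A's single mutating double loop with manual counters by four independent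
-- enumerate-based comprehensions, one per state code (idiomatic decomposition; return value identical).

-- ===== PORT A =====
-- state: (noContagiados, contagiados, hospitalContagiado, hospitalNoContagiado, counter)
def pvStepCol (cf : Int)
    (st : List (List Int) × List (List Int) × List (List Int) × List (List Int) × Int)
    (estado : String) :
    List (List Int) × List (List Int) × List (List Int) × List (List Int) × Int :=
  let cc := st.2.2.2.2 + 1
  if estado == "N" then (st.1 ++ [[cf, cc]], st.2.1, st.2.2.1, st.2.2.2.1, cc)
  else if estado == "C" then (st.1, st.2.1 ++ [[cf, cc]], st.2.2.1, st.2.2.2.1, cc)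
  else if estado == "CC" then (st.1, st.2.1, st.2.2.1 ++ [[cf, cc]], st.2.2.2.1, cc)
  else if estado == "CN" then (st.1, st.2.1, st.2.2.1, st.2.2.2.1 ++ [[cf, cc]], cc)
  else (st.1, st.2.1, st.2.2.1, st.2.2.2.1, cc)

def pvStepRow
    (st : List (List Int) × List (List Int) × List (List Int) × List (List Int) × Int)
    (fila : List String) :
    List (List Int) × List (List Int) × List (List Int) × List (List Int) × Int :=
  let cf := st.2.2.2.2 + 1
  let r := fila.foldl (pvStepCol cf) (st.1, st.2.1, st.2.2.1, st.2.2.2.1, -1)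
  (r.1, r.2.1, r.2.2.1, r.2.2.2.1, cf)

def pacientesRecoger (datos : List (List String)) : List (List Int) × List (List Int) × List (List Int) × List (List Int) × List (List Int) :=
  let st := datos.foldl pvStepRow ([], [], [], [], -1)
  (st.1 ++ st.2.1, st.1, st.2.1, st.2.2.1, st.2.2.2.1)

-- ===== PORT B =====
-- one comprehension: [[i, j] for i, fila in enumerate(datos) for j, e in enumerate(fila) if e == code]
def pvSelPos (code : String) (datos : List (List String)) : List (List Int) :=
  (PySem.List.enumerate datos 0).flatMap (fun p =>
    ((PySem.List.enumerate p.2 0).filter (fun q => q.2 == code)).map (fun q => [p.1, q.1]))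

def pacientesRecoger_alt (datos : List (List String)) : List (List Int) × List (List Int) × List (List Int) × List (List Int) × List (List Int) :=
  let noContagiados := pvSelPos "N" datos
  let contagiados := pvSelPos "C" datos
  let hospitalContagiado := pvSelPos "CC" datos
  let hospitalNoContagiado := pvSelPos "CN" datos
  (noContagiados ++ contagiados, noContagiados, contagiados, hospitalContagiado, hospitalNoContagiado)

-- ===== PRECONDITION & SPEC =====
def Spec_pacientesRecoger (datos : List (List String)) (out : List (List Int) × List (List Int) × List (List Int) × List (List Int) × List (List Int)) : Prop := out = pacientesRecoger_alt datos
instance (datos : List (List String)) (out : List (List Int) × List (List Int) × List (List Int) × List (List Int) × List (List Int)) : Decidable (Spec_pacientesRecoger datos out) := by unfold Spec_pacientesRecoger; infer_instance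

-- ===== CLAIM (what is proved, stated in full; the proofs are below) =====
def Claim_equal_pacientesRecoger : Prop := ∀ (datos : List (List String)), Dom_pacientesRecoger datos → Spec_pacientesRecoger datos (pacientesRecoger datos)

-- ===== LEMMAS AND PROOFS =====

-- row-local selection starting at column index s
def pvRSel (code : String) (cf s : Int) (fila : List String) : List (List Int) :=
  ((PySem.List.enumerate fila s).filter (fun q => q.2 == code)).map (fun q => [cf, q.1])

theorem pvRSel_cons (code : String) (cf s : Int) (e : String) (t : List String) :
    pvRSel code cf s (e :: t) =
      (if e == code then [[cf, s]] else []) ++ pvRSel code cf (s + 1) t := by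
  simp [pvRSel, PySem.List.enumerate_cons]
  split_ifs with h <;> simp [h]

theorem pv_inner_fold (cf : Int) (fila : List String) :
    ∀ (nc c hc hn : List (List Int)) (k : Int),
    fila.foldl (pvStepCol cf) (nc, c, hc, hn, k) =
      (nc ++ pvRSel "N" cf (k + 1) fila,
       c ++ pvRSel "C" cf (k + 1) fila,
       hc ++ pvRSel "CC" cf (k + 1) fila,
       hn ++ pvRSel "CN" cf (k + 1) fila,
       k + fila.length) := by
  induction fila with
  | nil => intro nc c hc hn k; simp [pvRSel, PySem.List.enumerate]
  | cons e t ih =>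
    intro nc c hc hn k
    simp only [List.foldl_cons, pvStepCol, pvRSel_cons]
    split_ifs with h1 h2 h3 h4 <;>
      simp only [ih] <;>
      refine Prod.ext ?_ (Prod.ext ?_ (Prod.ext ?_ (Prod.ext ?_ ?_))) <;>
      simp <;> first
        | (push_cast; ring)
        | simp_all

def pvSelOff (code : String) (s : Int) (datos : List (List String)) : List (List Int) :=
  (PySem.List.enumerate datos s).flatMap (fun p => pvRSel code p.1 0 p.2)

theorem pv_outer_fold (datos : List (List String)) :
    ∀ (nc c hc hn : List (List Int)) (k : Int),
    datos.foldl pvStepRow (nc, c, hc, hn, k) =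
      (nc ++ pvSelOff "N" (k + 1) datos,
       c ++ pvSelOff "C" (k + 1) datos,
       hc ++ pvSelOff "CC" (k + 1) datos,
       hn ++ pvSelOff "CN" (k + 1) datos,
       k + datos.length) := by
  induction datos with
  | nil => intro nc c hc hn k; simp [pvSelOff, PySem.List.enumerate]
  | cons fila t ih =>
    intro nc c hc hn k
    simp only [List.foldl_cons, pvStepRow, pv_inner_fold, ih, pvSelOff,
      PySem.List.enumerate_cons, List.flatMap_cons]
    refine Prod.ext ?_ (Prod.ext ?_ (Prod.ext ?_ (Prod.ext ?_ ?_))) <;>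
      simp [pvRSel] <;> omega

-- ===== VERDICT (by name: the statement is the Claim_ definition above) =====
theorem pacientesRecoger_spec : Claim_equal_pacientesRecoger := by
  intro datos _
  show pacientesRecoger datos = pacientesRecoger_alt datos
  simp [pacientesRecoger, pacientesRecoger_alt, pv_outer_fold, pvSelOff, pvSelPos, pvRSel]
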